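-- pv_equiv track=rewrite | github.com/gage/proto | site/threath/apps/search/utils.py | digit_seperate
-- ===== SOURCE A (Python) =====
-- def digit_seperate(str_o):
--     rtn_str = ''
--     last_is_digit = False
--     for c in str_o:
--         if c in '0123456789':
--             if not last_is_digit:
--                 # From non-digit to digit --> switch
--                 rtn_str = rtn_str + ' %s' % c
--                 last_is_digit = True
--             else:
--                 # From digit to digit --> pass
--                 rtn_str += c
--         else:
--             if last_is_digit:
--                 # From digit to non-digit --> switch
--                 rtn_str = rtn_str + ' %s' % c
--                 last_is_digit = False
--             else:
--                 # From digit to digit --> pass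
--                 rtn_str += c
--     return rtn_str
-- ===== SOURCE B (Python) =====
-- def digit_seperate(str_o):
--     # Partition into maximal digit / non-digit runs, then join: every run is
--     # preceded by one space except a leading non-digit run.
--     digits = '0123456789'
--     runs = []
--     i, n = 0, len(str_o)
--     while i < n:
--         k = str_o[i] in digits
--         j = i + 1
--         while j < n and (str_o[j] in digits) == k:
--             j += 1
--         runs.append((k, str_o[i:j]))
--         i = j
--     out = []
--     for idx, (k, seg) in enumerate(runs):
--         out.append(seg if (idx == 0 and not k) else ' ' + seg)
--     return ''.join(out)
-- ===== Notes on version B (the rewrite author's own statement) =====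
-- stated objective: alternative
-- what changed: B partitions the string once into maximal digit/non-digit runs (groupby-style two-pointer scan) and joins the runs with a single space before each run except a leading non-digit run, instead of A's char-by-char loop carrying a last_is_digit flag.
import Mathlib
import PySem

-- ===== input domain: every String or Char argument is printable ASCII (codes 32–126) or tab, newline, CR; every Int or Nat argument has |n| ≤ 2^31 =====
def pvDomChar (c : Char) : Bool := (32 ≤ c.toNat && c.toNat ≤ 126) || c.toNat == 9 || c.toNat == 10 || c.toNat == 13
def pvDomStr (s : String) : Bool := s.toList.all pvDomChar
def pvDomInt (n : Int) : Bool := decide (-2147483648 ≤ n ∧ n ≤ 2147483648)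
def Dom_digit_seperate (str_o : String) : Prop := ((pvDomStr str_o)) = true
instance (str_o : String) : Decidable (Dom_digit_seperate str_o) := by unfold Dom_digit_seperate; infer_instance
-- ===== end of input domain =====

-- B re-implements A as run-partition + join (groupby style); equivalence of return values.

-- shared helper: the literal membership test `c in '0123456789'` of both Pythons
def pvIsDig (c : Char) : Bool :=
  ['0','1','2','3','4','5','6','7','8','9'].contains c

-- ===== PORT A =====
-- literal transliteration of A's char loop with accumulator (rtn_str, last_is_digit);
-- strings are carried as List Char and packed with String.ofList at the end.
def digit_seperate (str_o : String) : String :=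
  String.ofList
    (str_o.toList.foldl
      (fun (st : List Char × Bool) c =>
        if pvIsDig c then
          if !st.2 then (st.1 ++ [' ', c], true)   -- non-digit → digit: switch
          else (st.1 ++ [c], true)                 -- digit → digit: pass
        else
          if st.2 then (st.1 ++ [' ', c], false)   -- digit → non-digit: switch
          else (st.1 ++ [c], false))               -- non-digit → non-digit: pass
      ([], false)).1

-- ===== PORT B =====
-- B's inner while loop: split the string into maximal runs of equal digit-ness
def pvRuns : List Char → List (Bool × List Char)
  | [] => []
  | c :: cs =>
    let k := pvIsDig c
    (k, c :: cs.takeWhile (fun x => pvIsDig x = k)) ::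
      pvRuns (cs.dropWhile (fun x => pvIsDig x = k))
termination_by cs => cs.length
decreasing_by
  simp only [List.length_cons]
  exact Nat.lt_succ_of_le (List.length_dropWhile_le _ _)

-- B's join loop: a space before every run except a leading non-digit run
def pvRender : List (Bool × List Char) → Bool → List Char
  | [], _ => []
  | (k, g) :: rs, first =>
    (if first && !k then g else ' ' :: g) ++ pvRender rs false

def digit_seperate_alt (str_o : String) : String :=
  String.ofList (pvRender (pvRuns str_o.toList) true)

-- ===== PRECONDITION & SPEC =====
def Spec_digit_seperate (str_o : String) (out : String) : Prop := out = digit_seperate_alt str_o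
instance (str_o : String) (out : String) : Decidable (Spec_digit_seperate str_o out) := by unfold Spec_digit_seperate; infer_instance

-- ===== CLAIM (what is proved, stated in full; the proofs are below) =====
def Claim_equal_digit_seperate : Prop := ∀ (str_o : String), Dom_digit_seperate str_o → Spec_digit_seperate str_o (digit_seperate str_o)

-- ===== LEMMAS AND PROOFS =====

-- canonical form both ports reduce to: emit a space exactly when digit-ness changes
def pvEmit : List Char → Bool → List Char
  | [], _ => []
  | c :: cs, last =>
    (if pvIsDig c ≠ last then [' ', c] else [c]) ++ pvEmit cs (pvIsDig c)

theorem pvA_loop (cs : List Char) : ∀ (st : List Char × Bool),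
    (cs.foldl
      (fun (st : List Char × Bool) c =>
        if pvIsDig c then
          if !st.2 then (st.1 ++ [' ', c], true) else (st.1 ++ [c], true)
        else
          if st.2 then (st.1 ++ [' ', c], false) else (st.1 ++ [c], false))
      st).1 = st.1 ++ pvEmit cs st.2 := by
  induction cs with
  | nil => intro st; simp [pvEmit]
  | cons c cs ih =>
    intro st
    rw [List.foldl_cons, ih]
    by_cases hd : pvIsDig c <;> cases hst : st.2 <;>
      simp [pvEmit, hd, hst, List.append_assoc]

theorem pvEmit_run (g : List Char) (k : Bool) (h : ∀ x ∈ g, pvIsDig x = k) :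
    ∀ rest, pvEmit (g ++ rest) k = g ++ pvEmit rest k := by
  induction g with
  | nil => intro rest; simp
  | cons c g ih =>
    intro rest
    have hc : pvIsDig c = k := h c (by simp)
    simp only [List.cons_append, pvEmit, hc]
    simp [ih (fun x hx => h x (by simp [hx]))]

theorem pvRuns_take_key (c : Char) (cs : List Char) :
    ∀ x ∈ cs.takeWhile (fun x => pvIsDig x = pvIsDig c), pvIsDig x = pvIsDig c := by
  intro x hx
  have := List.mem_takeWhile_imp hx
  simpa using this

theorem pvRuns_drop_key (c : Char) (cs : List Char) :
    ∀ d, (cs.dropWhile (fun x => pvIsDig x = pvIsDig c)).head? = some d →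
      pvIsDig d ≠ pvIsDig c := by
  intro d hd
  have := List.head?_dropWhile_not (fun x => pvIsDig x = pvIsDig c) cs
  rw [hd] at this
  simpa using this

theorem pvRender_runs (n : Nat) : ∀ (cs : List Char), cs.length ≤ n →
    ∀ (last : Bool), (∀ c, cs.head? = some c → pvIsDig c ≠ last) →
    pvRender (pvRuns cs) false = pvEmit cs last := by
  induction n with
  | zero =>
    intro cs hn last _
    cases cs with
    | nil => simp [pvRuns, pvRender, pvEmit]
    | cons c cs => simp at hn
  | succ n ih =>
    intro cs hn last hhd
    cases cs with
    | nil => simp [pvRuns, pvRender, pvEmit]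
    | cons c cs =>
      have hc : pvIsDig c ≠ last := hhd c rfl
      have hlen : (cs.dropWhile (fun x => pvIsDig x = pvIsDig c)).length ≤ n := by
        have := List.length_dropWhile_le (fun x => decide (pvIsDig x = pvIsDig c)) cs
        simp only [List.length_cons] at hn
        omega
      have hsplit : c :: cs =
          c :: (cs.takeWhile (fun x => pvIsDig x = pvIsDig c) ++
            cs.dropWhile (fun x => pvIsDig x = pvIsDig c)) := by
        simp [List.takeWhile_append_dropWhile]
      simp only [pvRuns, pvRender]
      rw [ih _ hlen (pvIsDig c) (pvRuns_drop_key c cs)]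
      conv_rhs => rw [hsplit]
      simp only [pvEmit]
      rw [pvEmit_run _ (pvIsDig c) (pvRuns_take_key c cs)]
      simp [hc, List.append_assoc]

theorem pvRender_top (cs : List Char) :
    pvRender (pvRuns cs) true = pvEmit cs false := by
  cases cs with
  | nil => simp [pvRuns, pvRender, pvEmit]
  | cons c cs =>
    have hsplit : c :: cs =
        c :: (cs.takeWhile (fun x => pvIsDig x = pvIsDig c) ++
          cs.dropWhile (fun x => pvIsDig x = pvIsDig c)) := by
      simp [List.takeWhile_append_dropWhile]
    simp only [pvRuns, pvRender]
    rw [pvRender_runs (cs.dropWhile (fun x => pvIsDig x = pvIsDig c)).length _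
      le_rfl (pvIsDig c) (pvRuns_drop_key c cs)]
    conv_rhs => rw [hsplit]
    simp only [pvEmit]
    rw [pvEmit_run _ (pvIsDig c) (pvRuns_take_key c cs)]
    cases h : pvIsDig c <;> simp [h, List.append_assoc]

-- ===== VERDICT (by name: the statement is the Claim_ definition above) =====
theorem digit_seperate_spec : Claim_equal_digit_seperate := by
  intro s _
  unfold Spec_digit_seperate digit_seperate digit_seperate_alt
  rw [pvRender_top, pvA_loop]
  simp
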